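-- pv_equiv track=rewrite | github.com/Mahendar1548/neetcode-dsa | Data Structures & Algorithms/minimum-interval-including-query/submission-3.py | _get_pivot_idx
-- ===== SOURCE A (Python) =====
-- def _get_pivot_idx(data, val):
--     low = 0
--     high = len(data) - 1
--
--     while low < high:
--         mid = (low + high) // 2
--         if data[mid] > val:
--             high = mid - 1
--         elif data[mid] < val:
--             low = mid + 1
--         else:
--             high = mid
--
--     return low
-- ===== SOURCE B (Python) =====
-- def _get_pivot_idx(data, val):
--     # Recursive binary search over list slices: carries the current segment
--     # and its base offset instead of low/high indices into the full list.
--     def search(seg, base):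
--         if len(seg) <= 1:
--             return base
--         mid = (len(seg) - 1) // 2
--         x = seg[mid]
--         if x > val:
--             return search(seg[:mid], base)
--         elif x < val:
--             return search(seg[mid + 1:], base + mid + 1)
--         else:
--             return search(seg[:mid + 1], base)
--     return search(data, 0)
-- ===== Notes on version B (the rewrite author's own statement) =====
-- stated objective: alternative
-- what changed: Replaced the iterative low/high index-narrowing loop with a recursive binary search that descends into list slices, carrying the current segment and a base offset instead of indices into the full list.
import Mathlib
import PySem

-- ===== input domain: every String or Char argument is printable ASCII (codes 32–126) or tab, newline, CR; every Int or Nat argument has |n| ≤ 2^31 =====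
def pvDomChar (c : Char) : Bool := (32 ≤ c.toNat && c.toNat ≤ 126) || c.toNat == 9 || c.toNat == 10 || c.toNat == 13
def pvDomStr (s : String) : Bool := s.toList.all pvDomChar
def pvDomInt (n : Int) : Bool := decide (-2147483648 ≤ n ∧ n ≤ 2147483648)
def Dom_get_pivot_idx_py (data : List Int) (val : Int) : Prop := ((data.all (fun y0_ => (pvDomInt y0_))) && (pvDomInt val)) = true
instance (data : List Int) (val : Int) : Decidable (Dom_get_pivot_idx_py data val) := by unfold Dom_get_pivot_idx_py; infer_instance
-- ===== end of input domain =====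

-- B replaces A's iterative low/high index-narrowing loop by a recursive binary
-- search over list slices with a base offset (alternative decomposition, same result).

-- ===== PORT A =====
-- A's while loop as recursion on the shrinking gap (high - low); mid is always a
-- valid index when low < high starting from low = 0, high = len-1, so the 'none'
-- IndexError branch of pyGet? is unreachable (0 stands in for it).
def pvGoA (data : List Int) (val low high : Int) : Int :=
  if h : low < high then
    let mid := PySem.Int.floordiv (low + high) 2
    match PySem.List.pyGet? data mid with
    | some x =>
      if x > val then pvGoA data val low (mid - 1)
      else if x < val then pvGoA data val (mid + 1) high
      else pvGoA data val low mid
    | none => 0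
  else low
termination_by (high - low).toNat
decreasing_by
  all_goals
    have h2 := PySem.Int.floordiv_eq_ediv_of_pos (a := low + high) (b := 2) (by omega)
    omega

def get_pivot_idx_py (data : List Int) (val : Int) : Int :=
  pvGoA data val 0 ((data.length : Int) - 1)

-- ===== PORT B =====
-- B's recursive helper: segment + base offset; slices become take/drop
-- (Source B's slices all have in-range nonnegative bounds).
def pvSearchB (val : Int) (seg : List Int) (base : Int) : Int :=
  if _h : seg.length ≤ 1 then base
  else
    let mid := (seg.length - 1) / 2
    match seg[mid]? with
    | some x =>
      if x > val then pvSearchB val (seg.take mid) base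
      else if x < val then pvSearchB val (seg.drop (mid + 1)) (base + (mid : Int) + 1)
      else pvSearchB val (seg.take (mid + 1)) base
    | none => base
termination_by seg.length
decreasing_by
  · simp; omega
  · simp; omega
  · simp; omega

def get_pivot_idx_py_alt (data : List Int) (val : Int) : Int :=
  pvSearchB val data 0

-- ===== PRECONDITION & SPEC =====
def Spec_get_pivot_idx_py (data : List Int) (val : Int) (out : Int) : Prop := out = get_pivot_idx_py_alt data val
instance (data : List Int) (val : Int) (out : Int) : Decidable (Spec_get_pivot_idx_py data val out) := by unfold Spec_get_pivot_idx_py; infer_instance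

-- ===== CLAIM (what is proved, stated in full; the proofs are below) =====
def Claim_equal_get_pivot_idx_py : Prop := ∀ (data : List Int) (val : Int), Dom_get_pivot_idx_py data val → Spec_get_pivot_idx_py data val (get_pivot_idx_py data val)

-- ===== LEMMAS AND PROOFS =====

-- A's state (low, high) corresponds to B's state (segment = data[low : high+1], base = low).
theorem pvGoA_eq_searchB (data : List Int) (val : Int) :
    ∀ (k : Nat) (low high : Int), 0 ≤ low → high ≤ (data.length : Int) - 1 →
      (high - low).toNat ≤ k →
      pvGoA data val low high =
        pvSearchB val ((data.drop low.toNat).take (high + 1 - low).toNat) low := by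
  intro k
  induction k with
  | zero =>
    intro low high hlo hhi hk
    have h : ¬ low < high := by omega
    have hlen1 : ((data.drop low.toNat).take (high + 1 - low).toNat).length ≤ 1 := by
      simp; omega
    rw [pvGoA, pvSearchB, dif_neg h, dif_pos hlen1]
  | succ k ih =>
    intro low high hlo hhi hk
    by_cases h : low < high
    · obtain ⟨seg, hseg⟩ : ∃ s, (data.drop low.toNat).take (high + 1 - low).toNat = s := ⟨_, rfl⟩
      obtain ⟨m, hm⟩ : ∃ m, PySem.Int.floordiv (low + high) 2 = m := ⟨_, rfl⟩
      have hmval : m = low + (high - low) / 2 := by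
        have := PySem.Int.floordiv_eq_ediv_of_pos (a := low + high) (b := 2) (by omega)
        omega
      have hmb : low ≤ m ∧ m < high := by constructor <;> omega
      have hlen : seg.length = (high + 1 - low).toNat := by
        rw [← hseg]; simp; omega
      obtain ⟨mr, hmr⟩ : ∃ r, (seg.length - 1) / 2 = r := ⟨_, rfl⟩
      have hmrval : (mr : Int) = m - low := by
        have h1 : mr = ((high + 1 - low).toNat - 1) / 2 := by rw [← hmr, hlen]
        omega
      have hmidn : m.toNat < data.length := by omega
      obtain ⟨x, hx⟩ : ∃ x, data[m.toNat]? = some x :=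
        ⟨_, List.getElem?_eq_getElem hmidn⟩
      have hA : PySem.List.pyGet? data m = some x := by
        rw [PySem.List.pyGet?_of_nonneg data (by omega), hx]
      have hB : seg[mr]? = some x := by
        rw [← hseg, List.getElem?_take_of_lt (by omega), List.getElem?_drop, ← hx]
        congr 1
        omega
      have hnot1 : ¬ seg.length ≤ 1 := by omega
      rw [hseg, pvGoA, pvSearchB]
      simp only [dif_pos h, dif_neg hnot1, hm, hmr, hA, hB]
      by_cases h1 : x > val
      · simp only [if_pos h1]
        rw [ih low (m - 1) hlo (by omega) (by omega)]
        have hs1 : seg.take mr = List.take (m - 1 + 1 - low).toNat (List.drop low.toNat data) := by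
          rw [← hseg, List.take_take]
          have e : min mr (high + 1 - low).toNat = (m - 1 + 1 - low).toNat := by omega
          rw [e]
        rw [hs1]
      · simp only [if_neg h1]
        by_cases h2 : x < val
        · simp only [if_pos h2]
          rw [ih (m + 1) high (by omega) hhi (by omega)]
          have hs2 : seg.drop (mr + 1) =
              List.take (high + 1 - (m + 1)).toNat (List.drop (m + 1).toNat data) := by
            rw [← hseg, List.drop_take, List.drop_drop]
            have e1 : (high + 1 - low).toNat - (mr + 1) = (high + 1 - (m + 1)).toNat := by omega
            have e2 : low.toNat + (mr + 1) = (m + 1).toNat := by omega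
            rw [e1, e2]
          rw [hs2]
          congr 1
          omega
        · simp only [if_neg h2]
          rw [ih low m hlo (by omega) (by omega)]
          have hs3 : seg.take (mr + 1) = List.take (m + 1 - low).toNat (List.drop low.toNat data) := by
            rw [← hseg, List.take_take]
            have e : min (mr + 1) (high + 1 - low).toNat = (m + 1 - low).toNat := by omega
            rw [e]
          rw [hs3]
    · have hlen1 : ((data.drop low.toNat).take (high + 1 - low).toNat).length ≤ 1 := by
        simp; omega
      rw [pvGoA, pvSearchB, dif_neg h, dif_pos hlen1]

-- ===== VERDICT (by name: the statement is the Claim_ definition above) =====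
theorem get_pivot_idx_py_spec : Claim_equal_get_pivot_idx_py := by
  intro data val _
  unfold Spec_get_pivot_idx_py get_pivot_idx_py get_pivot_idx_py_alt
  have := pvGoA_eq_searchB data val ((data.length : Int) - 1 - 0).toNat 0 ((data.length : Int) - 1)
    le_rfl (by omega) le_rfl
  rw [this]
  have e : (((data.length : Int) - 1) + 1 - 0).toNat = data.length := by omega
  rw [show ((0:Int)).toNat = 0 from rfl, e]
  simp
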